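-- pv_equiv track=rewrite | github.com/isegura/OCWEDA2022 | TEMA7/tema7_problemas.py | getWordsLength2
-- ===== SOURCE A (Python) =====
-- def getWordsLength2(words):
--     if words is None or len(words) == 0:
--         return []
--
--     if len(words) == 1:
--         w = words[0]
--         if len(w) <= 2:
--             return [w]
--         else:
--             return []
--
--     m = len(words) // 2
--     part1 = words[:m]
--     part2 = words[m:]
--
--     result1 = getWordsLength2(part1)
--     result2 = getWordsLength2(part2)
--
--     return result1 + result2
-- ===== SOURCE B (Python) =====
-- def getWordsLength2(words):
--     if words is None or len(words) == 0:
--         return []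
--     result = []
--     for w in words:
--         if len(w) <= 2:
--             result.append(w)
--     return result
-- ===== Notes on version B (the rewrite author's own statement) =====
-- stated objective: simpler
-- what changed: Replaces the divide-and-conquer recursion (split at the midpoint, recurse on both halves, concatenate the partial results) with one flat iterative pass that appends each word of length <= 2 to an accumulator list.
import Mathlib
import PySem

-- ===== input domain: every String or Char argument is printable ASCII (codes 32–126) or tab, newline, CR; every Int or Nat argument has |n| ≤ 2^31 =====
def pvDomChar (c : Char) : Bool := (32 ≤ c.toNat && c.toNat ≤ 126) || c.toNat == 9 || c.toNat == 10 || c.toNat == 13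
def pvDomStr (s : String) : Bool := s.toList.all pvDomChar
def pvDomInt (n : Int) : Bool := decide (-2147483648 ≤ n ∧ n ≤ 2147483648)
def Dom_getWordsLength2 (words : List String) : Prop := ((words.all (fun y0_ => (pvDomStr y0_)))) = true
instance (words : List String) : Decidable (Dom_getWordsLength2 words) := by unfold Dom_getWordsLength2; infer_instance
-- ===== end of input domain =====

-- B replaces A's divide-and-conquer recursion by a single iterative accumulating pass (simpler).
-- The `words is None` guard has no Lean counterpart: the argument is always a List String.

-- ===== PORT A =====
-- words[:m] / words[m:] with 0 ≤ m ≤ len(words) are exactly List.take / List.drop;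
-- len(words) // 2 on a nonnegative length is exactly Nat division.
def getWordsLength2 (words : List String) : List String :=
  if words.length = 0 then []
  else if words.length = 1 then
    let w := words.headI
    if PySem.Str.len w ≤ 2 then [w] else []
  else
    let m := words.length / 2
    let part1 := words.take m
    let part2 := words.drop m
    let result1 := getWordsLength2 part1
    let result2 := getWordsLength2 part2
    result1 ++ result2
termination_by words.length
decreasing_by
  · simp only [List.length_take]; omega
  · simp only [List.length_drop]; omega

-- ===== PORT B =====
def getWordsLength2_alt (words : List String) : List String :=
  if words.length = 0 then []
  else words.foldl (fun result w => if PySem.Str.len w ≤ 2 then result ++ [w] else result) []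

-- ===== PRECONDITION & SPEC =====
def Spec_getWordsLength2 (words : List String) (out : List String) : Prop := out = getWordsLength2_alt words
instance (words : List String) (out : List String) : Decidable (Spec_getWordsLength2 words out) := by unfold Spec_getWordsLength2; infer_instance

-- ===== CLAIM (what is proved, stated in full; the proofs are below) =====
def Claim_equal_getWordsLength2 : Prop := ∀ (words : List String), Dom_getWordsLength2 words → Spec_getWordsLength2 words (getWordsLength2 words)

-- ===== LEMMAS AND PROOFS =====

-- B's loop accumulates exactly the filter.
theorem alt_foldl_eq_filter (l : List String) (acc : List String) :
    l.foldl (fun result w => if PySem.Str.len w ≤ 2 then result ++ [w] else result) acc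
      = acc ++ l.filter (fun w => PySem.Str.len w ≤ 2) := by
  induction l generalizing acc with
  | nil => simp
  | cons x xs ih =>
    simp only [List.foldl_cons, List.filter_cons]
    by_cases h : PySem.Str.len x ≤ 2
    · simp_all [PySem.Str.len]
    · simp_all [PySem.Str.len]
      rw [if_neg (by omega), if_neg (by omega)]

theorem alt_eq_filter (words : List String) :
    getWordsLength2_alt words = words.filter (fun w => PySem.Str.len w ≤ 2) := by
  unfold getWordsLength2_alt
  split
  · next h => simp [List.length_eq_zero_iff.mp h]
  · simpa using alt_foldl_eq_filter words []

-- A's divide-and-conquer also computes the filter (strong induction on length).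
theorem a_eq_filter (words : List String) :
    getWordsLength2 words = words.filter (fun w => PySem.Str.len w ≤ 2) := by
  induction words using getWordsLength2.induct with
  | case1 words h => rw [getWordsLength2]; simp [List.length_eq_zero_iff.mp h]
  | case2 words h1 h2 w hle =>
    obtain ⟨x, hx⟩ := List.length_eq_one_iff.mp h2
    subst hx
    by_cases hl : x.length ≤ 2 <;>
      simp [getWordsLength2, PySem.Str.len, hl]
  | case3 words h1 h2 w hgt =>
    obtain ⟨x, hx⟩ := List.length_eq_one_iff.mp h2
    subst hx
    by_cases hl : x.length ≤ 2 <;>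
      simp [getWordsLength2, PySem.Str.len, hl]
  | case4 words h1 h2 m part1 part2 ih1 ih2 =>
    rw [getWordsLength2]
    simp only [if_neg h1, if_neg h2]
    rw [ih1, ih2, ← List.filter_append, List.take_append_drop]

-- ===== VERDICT (by name: the statement is the Claim_ definition above) =====
theorem getWordsLength2_spec : Claim_equal_getWordsLength2 := by
  intro words _
  unfold Spec_getWordsLength2
  rw [a_eq_filter, alt_eq_filter]
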